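-- pv_equiv track=rewrite | github.com/christianescamilla15-cell/nexusforge-engine | core/compatibility.py | get_missing_dependencies
-- ===== SOURCE A (Python) =====
-- from typing import Any
--
-- COMPATIBILITY_MATRIX: dict[str, dict[str, Any]] = {
--     "auth": {
--         "compatible_blueprints": ["ticket_system", "invoice_processor", "agentic_saas"],
--         "requires": [],
--         "conflicts_with": [],
--         "python_packages": ["bcrypt>=4.1", "python-jose>=3.3", "passlib>=1.7"],
--         "env_vars": ["SECRET_KEY", "ACCESS_TOKEN_EXPIRE_MINUTES", "REFRESH_TOKEN_EXPIRE_DAYS"],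
--     },
--     "billing": {
--         "compatible_blueprints": ["agentic_saas", "invoice_processor"],
--         "requires": ["auth"],
--         "conflicts_with": [],
--         "python_packages": ["stripe>=8.0"],
--         "env_vars": ["STRIPE_SECRET_KEY", "STRIPE_WEBHOOK_SECRET", "STRIPE_PRICE_PRO", "STRIPE_PRICE_ENTERPRISE"],
--     },
--     "analytics": {
--         "compatible_blueprints": ["ticket_system", "invoice_processor", "agentic_saas"],
--         "requires": ["auth"],
--         "conflicts_with": [],
--         "python_packages": [],
--         "env_vars": ["ANALYTICS_RETENTION_DAYS"],
--     },
--     "ai_chat": {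
--         "compatible_blueprints": ["agentic_saas"],
--         "requires": ["auth"],
--         "conflicts_with": [],
--         "python_packages": ["anthropic>=0.39"],
--         "env_vars": ["ANTHROPIC_API_KEY", "AI_MODEL", "AI_MAX_TOKENS"],
--     },
--     "notifications": {
--         "compatible_blueprints": ["ticket_system", "invoice_processor", "agentic_saas"],
--         "requires": ["auth"],
--         "conflicts_with": [],
--         "python_packages": ["aiosmtplib>=3.0"],
--         "env_vars": ["SMTP_HOST", "SMTP_PORT", "SMTP_USER", "SMTP_PASSWORD", "FROM_EMAIL"],
--     },
--     "connectors": {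
--         "compatible_blueprints": ["ticket_system", "invoice_processor", "agentic_saas"],
--         "requires": ["auth"],
--         "conflicts_with": [],
--         "python_packages": [
--             "slack-sdk>=3.27",
--             "google-api-python-client>=2.0",
--             "notion-client>=2.2",
--         ],
--         "env_vars": [
--             "SLACK_BOT_TOKEN",
--             "SLACK_SIGNING_SECRET",
--             "GOOGLE_SERVICE_ACCOUNT_JSON",
--             "NOTION_API_KEY",
--             "JIRA_URL",
--             "JIRA_API_TOKEN",
--         ],
--     },
--     "observability": {
--         "compatible_blueprints": ["ticket_system", "invoice_processor", "agentic_saas"],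
--         "requires": [],
--         "conflicts_with": [],
--         "python_packages": ["structlog>=24.0"],
--         "env_vars": ["LOG_LEVEL", "LOG_FORMAT", "SENTRY_DSN"],
--     },
--     "admin_panel": {
--         "compatible_blueprints": ["ticket_system", "invoice_processor", "agentic_saas"],
--         "requires": ["auth", "observability"],
--         "conflicts_with": [],
--         "python_packages": [],
--         "env_vars": ["ADMIN_EMAIL"],
--     },
-- }
--
-- def get_missing_dependencies(modules: list[str]) -> list[str]:
--     """Return module IDs that are required but not present in *modules*.
--
--     Args:
--         modules: List of module IDs in the composition.
--
--     Returns: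
--         Sorted list of missing dependency IDs.
--     """
--     present = set(modules)
--     missing: set[str] = set()
--
--     for mod_id in modules:
--         entry = COMPATIBILITY_MATRIX.get(mod_id)
--         if entry is None:
--             continue
--         for dep in entry["requires"]:
--             if dep not in present:
--                 missing.add(dep)
--
--     return sorted(missing)
-- ===== SOURCE B (Python) =====
-- from typing import Any
--
-- COMPATIBILITY_MATRIX: dict[str, dict[str, Any]] = {
--     "auth": {"requires": []},
--     "billing": {"requires": ["auth"]},
--     "analytics": {"requires": ["auth"]},
--     "ai_chat": {"requires": ["auth"]},
--     "notifications": {"requires": ["auth"]},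
--     "connectors": {"requires": ["auth"]},
--     "observability": {"requires": []},
--     "admin_panel": {"requires": ["auth", "observability"]},
-- }
--
-- # Reverse index, built once at import time: dependency -> modules that require it.
-- REQUIRED_BY: dict[str, list[str]] = {}
-- for _mod_id, _entry in COMPATIBILITY_MATRIX.items():
--     for _dep in _entry["requires"]:
--         REQUIRED_BY.setdefault(_dep, []).append(_mod_id)
--
-- DEP_ORDER: list[str] = sorted(REQUIRED_BY)
--
--
-- def get_missing_dependencies(modules: list[str]) -> list[str]:
--     """Walk the (pre-sorted) dependency universe via the reverse index:
--     a dep is missing iff it is absent and some module requiring it is present.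
--     The output is emitted already in sorted order; no result sort is needed."""
--     present = set(modules)
--     return [dep for dep in DEP_ORDER
--             if dep not in present and any(m in present for m in REQUIRED_BY[dep])]
-- ===== Notes on version B (the rewrite author's own statement) =====
-- stated objective: alternative
-- what changed: B precomputes a reverse index (dependency -> modules that require it) once at import time, then answers each query by a single walk over the pre-sorted dependency universe, emitting a dep when it is absent and one of its requirers is present - no missing-set accumulation and no per-call sort of the result, unlike A's per-module loop that filters each module's requires list and sorts the collected set.
import Mathlib
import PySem

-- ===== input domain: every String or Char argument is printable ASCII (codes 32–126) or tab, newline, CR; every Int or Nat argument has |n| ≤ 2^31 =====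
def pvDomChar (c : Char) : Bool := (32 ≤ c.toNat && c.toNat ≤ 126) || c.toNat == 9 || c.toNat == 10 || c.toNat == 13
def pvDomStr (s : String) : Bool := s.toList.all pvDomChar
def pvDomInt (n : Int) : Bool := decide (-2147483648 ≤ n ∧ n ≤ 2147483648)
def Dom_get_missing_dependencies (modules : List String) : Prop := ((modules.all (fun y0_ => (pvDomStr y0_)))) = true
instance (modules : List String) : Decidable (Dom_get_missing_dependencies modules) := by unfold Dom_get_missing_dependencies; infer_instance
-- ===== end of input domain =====

-- B replaces A's per-module scan with incremental missing-set accumulation by a precomputed reverse index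
-- (dependency -> requiring modules): it walks the sorted dependency universe once and emits the output
-- already in order, with no result set and no result sort; objective: alternative.

-- ===== PORT A =====
-- COMPATIBILITY_MATRIX projected to its "requires" field — the only field either program reads.
def pvMatrixRequires : PySem.Dict String (List String) :=
  PySem.Dict.ofList
    [ ("auth", []), ("billing", ["auth"]), ("analytics", ["auth"]), ("ai_chat", ["auth"])
    , ("notifications", ["auth"]), ("connectors", ["auth"]), ("observability", [])
    , ("admin_panel", ["auth", "observability"]) ]

def get_missing_dependencies (modules : List String) : List String :=
  let present : PySem.Set String := PySem.Set.ofList modules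
  let missing : PySem.Set String :=
    modules.foldl (fun miss mod_id =>
      match pvMatrixRequires.get? mod_id with
      | none => miss
      | some reqs =>
          reqs.foldl (fun m dep =>
            if PySem.Set.contains present dep then m else PySem.Set.add m dep) miss)
      PySem.Set.empty
  PySem.List.sorted missing (fun x => x) false

-- ===== PORT B =====
-- REQUIRED_BY: the reverse index dep -> [modules requiring dep], built once from the matrix at module load
-- (Python's REQUIRED_BY.setdefault(dep, []).append(mod_id) is exactly Dict.modify dep [] (· ++ [mod_id])).
def pvRequiredBy : PySem.Dict String (List String) :=
  pvMatrixRequires.items.foldl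
    (fun d p => p.2.foldl (fun d dep => d.modify dep [] (fun l => l ++ [p.1])) d)
    PySem.Dict.empty

-- DEP_ORDER = sorted(REQUIRED_BY)
def pvDepOrder : List String := PySem.List.sorted pvRequiredBy.keys (fun x => x) false

def get_missing_dependencies_alt (modules : List String) : List String :=
  let present : PySem.Set String := PySem.Set.ofList modules
  pvDepOrder.filter (fun dep =>
    !(PySem.Set.contains present dep) &&
      (pvRequiredBy.getD dep []).any (fun m => PySem.Set.contains present m))

-- ===== PRECONDITION & SPEC =====
def Spec_get_missing_dependencies (modules : List String) (out : List String) : Prop := out = get_missing_dependencies_alt modules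
instance (modules : List String) (out : List String) : Decidable (Spec_get_missing_dependencies modules out) := by unfold Spec_get_missing_dependencies; infer_instance

-- ===== CLAIM (what is proved, stated in full; the proofs are below) =====
def Claim_equal_get_missing_dependencies : Prop := ∀ (modules : List String), Dom_get_missing_dependencies modules → Spec_get_missing_dependencies modules (get_missing_dependencies modules)

-- ===== LEMMAS AND PROOFS =====

-- concrete evaluations of the module-level constants of B
theorem pv_rb_auth :
    pvRequiredBy.getD "auth" [] =
      ["billing", "analytics", "ai_chat", "notifications", "connectors", "admin_panel"] := rfl

theorem pv_rb_obs : pvRequiredBy.getD "observability" [] = ["admin_panel"] := rfl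

theorem pv_auth_lt_obs : ("auth" : String) < "observability" := by
  rw [String.lt_iff_toList_lt]; decide

theorem pv_depOrder_eval : pvDepOrder = ["auth", "observability"] := by
  have h : pvRequiredBy.keys = ["auth", "observability"] := rfl
  unfold pvDepOrder
  rw [h]
  apply PySem.List.sorted_eq_self_of_pairwise
  refine List.pairwise_cons.mpr ⟨?_, List.pairwise_singleton _ _⟩
  intro y hy
  rw [List.mem_singleton] at hy
  subst hy
  exact le_of_lt pv_auth_lt_obs

-- the matrix lookup, characterised against B's reverse index
theorem pv_req_iff (m x : String) :
    (∃ reqs, pvMatrixRequires.get? m = some reqs ∧ x ∈ reqs) ↔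
      ((x = "auth" ∧ m ∈ pvRequiredBy.getD "auth" []) ∨
       (x = "observability" ∧ m = "admin_panel")) := by
  rw [pv_rb_auth]
  by_cases h1 : "auth" = m
  · subst h1; simp [show pvMatrixRequires.get? "auth" = some [] from rfl]
  by_cases h2 : "billing" = m
  · subst h2; simp [show pvMatrixRequires.get? "billing" = some ["auth"] from rfl]
  by_cases h3 : "analytics" = m
  · subst h3; simp [show pvMatrixRequires.get? "analytics" = some ["auth"] from rfl]
  by_cases h4 : "ai_chat" = m
  · subst h4; simp [show pvMatrixRequires.get? "ai_chat" = some ["auth"] from rfl]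
  by_cases h5 : "notifications" = m
  · subst h5; simp [show pvMatrixRequires.get? "notifications" = some ["auth"] from rfl]
  by_cases h6 : "connectors" = m
  · subst h6; simp [show pvMatrixRequires.get? "connectors" = some ["auth"] from rfl]
  by_cases h7 : "observability" = m
  · subst h7; simp [show pvMatrixRequires.get? "observability" = some [] from rfl]
  by_cases h8 : "admin_panel" = m
  · subst h8; simp [show pvMatrixRequires.get? "admin_panel" = some ["auth", "observability"] from rfl]
  · have hnone : pvMatrixRequires.get? m = none := by
      show (PySem.Dict.mk [ ("auth", ([] : List String)), ("billing", ["auth"]), ("analytics", ["auth"]), ("ai_chat", ["auth"])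
        , ("notifications", ["auth"]), ("connectors", ["auth"]), ("observability", [])
        , ("admin_panel", ["auth", "observability"]) ]).get? m = none
      simp [beq_iff_eq, h1, h2, h3, h4, h5, h6, h7, h8,
        PySem.Dict.get?]
    simp [hnone, h2, h3, h4, h5, h6, h8, eq_comm (a := m)]

-- inner loop of A: membership characterization
theorem pv_mem_inner (present : PySem.Set String) (reqs : List String) (miss : PySem.Set String) (x : String) :
    x ∈ reqs.foldl (fun m dep => if PySem.Set.contains present dep then m else PySem.Set.add m dep) miss ↔
      x ∈ miss ∨ (x ∈ reqs ∧ x ∉ present) := by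
  induction reqs generalizing miss with
  | nil => simp
  | cons r rs ih =>
      simp only [List.foldl_cons, ih]
      by_cases hc : PySem.Set.contains present r = true
      · have hr : r ∈ present := by
          simpa [PySem.Set.contains] using hc
        rw [if_pos hc]
        constructor
        · rintro (h | h)
          · exact Or.inl h
          · exact Or.inr ⟨List.mem_cons_of_mem _ h.1, h.2⟩
        · rintro (h | ⟨hm, hnp⟩)
          · exact Or.inl h
          · rcases List.mem_cons.mp hm with rfl | hm'
            · exact absurd hr hnp
            · exact Or.inr ⟨hm', hnp⟩
      · have hr : r ∉ present := by
          simpa [PySem.Set.contains] using hc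
        rw [if_neg hc]
        simp only [PySem.Set.mem_add]
        constructor
        · rintro ((h | rfl) | h)
          · exact Or.inl h
          · exact Or.inr ⟨List.mem_cons_self, hr⟩
          · exact Or.inr ⟨List.mem_cons_of_mem _ h.1, h.2⟩
        · rintro (h | ⟨hm, hnp⟩)
          · exact Or.inl (Or.inl h)
          · rcases List.mem_cons.mp hm with rfl | hm'
            · exact Or.inl (Or.inr rfl)
            · exact Or.inr ⟨hm', hnp⟩

-- inner loop of A preserves Nodup
theorem pv_nodup_inner (present : PySem.Set String) (reqs : List String) (miss : PySem.Set String)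
    (h : miss.Nodup) :
    (reqs.foldl (fun m dep => if PySem.Set.contains present dep then m else PySem.Set.add m dep) miss).Nodup := by
  induction reqs generalizing miss with
  | nil => exact h
  | cons r rs ih =>
      simp only [List.foldl_cons]
      split_ifs with hc
      · exact ih miss h
      · exact ih _ (PySem.Set.nodup_add _ _ h)

-- outer loop of A: membership characterization
theorem pv_mem_outer (present : PySem.Set String) (mods : List String) (init : PySem.Set String) (x : String) :
    x ∈ mods.foldl (fun miss mod_id =>
        match pvMatrixRequires.get? mod_id with
        | none => miss
        | some reqs => reqs.foldl (fun m dep =>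
            if PySem.Set.contains present dep then m else PySem.Set.add m dep) miss) init ↔
      x ∈ init ∨ ((∃ m ∈ mods, ∃ reqs, pvMatrixRequires.get? m = some reqs ∧ x ∈ reqs) ∧ x ∉ present) := by
  induction mods generalizing init with
  | nil => simp
  | cons m ms ih =>
      simp only [List.foldl_cons]
      cases hm : pvMatrixRequires.get? m with
      | none =>
          simp only [ih]
          constructor
          · rintro (h | ⟨⟨m', hm', reqs, hr, hx⟩, hnp⟩)
            · exact Or.inl h
            · exact Or.inr ⟨⟨m', List.mem_cons_of_mem _ hm', reqs, hr, hx⟩, hnp⟩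
          · rintro (h | ⟨⟨m', hm', reqs, hr, hx⟩, hnp⟩)
            · exact Or.inl h
            · rcases List.mem_cons.mp hm' with rfl | hm''
              · rw [hm] at hr; cases hr
              · exact Or.inr ⟨⟨m', hm'', reqs, hr, hx⟩, hnp⟩
      | some reqs =>
          simp only [ih, pv_mem_inner]
          constructor
          · rintro (⟨h | ⟨hx, hnp⟩⟩ | ⟨⟨m', hm', reqs', hr, hx⟩, hnp⟩)
            · exact Or.inl h
            · exact Or.inr ⟨⟨m, List.mem_cons_self, reqs, hm, hx⟩, hnp⟩
            · exact Or.inr ⟨⟨m', List.mem_cons_of_mem _ hm', reqs', hr, hx⟩, hnp⟩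
          · rintro (h | ⟨⟨m', hm', reqs', hr, hx⟩, hnp⟩)
            · exact Or.inl (Or.inl h)
            · rcases List.mem_cons.mp hm' with rfl | hm''
              · rw [hm] at hr
                exact Or.inl (Or.inr ⟨by injection hr with h'; exact h' ▸ hx, hnp⟩)
              · exact Or.inr ⟨⟨m', hm'', reqs', hr, hx⟩, hnp⟩

-- outer loop of A preserves Nodup
theorem pv_nodup_outer (present : PySem.Set String) (mods : List String) (init : PySem.Set String)
    (h : init.Nodup) :
    (mods.foldl (fun miss mod_id =>
        match pvMatrixRequires.get? mod_id with
        | none => miss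
        | some reqs => reqs.foldl (fun m dep =>
            if PySem.Set.contains present dep then m else PySem.Set.add m dep) miss) init).Nodup := by
  induction mods generalizing init with
  | nil => exact h
  | cons m ms ih =>
      simp only [List.foldl_cons]
      cases hm : pvMatrixRequires.get? m with
      | none => exact ih init h
      | some reqs => exact ih _ (pv_nodup_inner present reqs init h)

-- ===== VERDICT (by name: the statement is the Claim_ definition above) =====
theorem get_missing_dependencies_spec : Claim_equal_get_missing_dependencies := by
  intro modules _
  unfold Spec_get_missing_dependencies get_missing_dependencies get_missing_dependencies_alt
  rw [pv_depOrder_eval]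
  apply PySem.List.sorted_eq_of_perm_of_pairwise_lt
  · dsimp only
    refine (List.perm_ext_iff_of_nodup ?_ ?_).mpr ?_
    · exact List.Nodup.filter _ (by decide)
    · exact pv_nodup_outer _ _ _ List.nodup_nil
    intro x
    have hc : ∀ y : String, (PySem.Set.ofList modules).contains y = true ↔ y ∈ modules :=
      fun y => by rw [PySem.Set.contains_iff, PySem.Set.mem_ofList]
    have hcf : ∀ y : String, (PySem.Set.ofList modules).contains y = false ↔ y ∉ modules :=
      fun y => by rw [Bool.eq_false_iff]; exact not_congr (hc y)
    rw [List.mem_filter, pv_mem_outer]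
    simp only [Bool.and_eq_true, Bool.not_eq_true', List.any_eq_true, List.mem_cons,
      List.not_mem_nil, or_false, hc, hcf,
      PySem.Set.mem_ofList, PySem.Set.empty, false_or]
    constructor
    · rintro ⟨hx | hx, hnp, m, hm, hmp⟩ <;> subst hx
      · exact ⟨⟨m, hmp, (pv_req_iff m "auth").mpr (Or.inl ⟨rfl, hm⟩)⟩, hnp⟩
      · rw [pv_rb_obs, List.mem_singleton] at hm
        subst hm
        exact ⟨⟨"admin_panel", hmp,
          (pv_req_iff "admin_panel" "observability").mpr (Or.inr ⟨rfl, rfl⟩)⟩, hnp⟩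
    · rintro ⟨⟨m, hm, reqs, hr, hx⟩, hnp⟩
      rcases (pv_req_iff m x).mp ⟨reqs, hr, hx⟩ with ⟨rfl, hrb⟩ | ⟨rfl, rfl⟩
      · exact ⟨Or.inl rfl, hnp, m, hrb, hm⟩
      · exact ⟨Or.inr rfl, hnp, "admin_panel",
          by rw [pv_rb_obs]; exact List.mem_singleton.mpr rfl, hm⟩
  · refine List.Pairwise.sublist List.filter_sublist ?_
    refine List.pairwise_cons.mpr ⟨?_, List.pairwise_singleton _ _⟩
    intro y hy
    rw [List.mem_singleton] at hy
    subst hy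
    exact pv_auth_lt_obs
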